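-- pv_equiv track=rewrite | github.com/eerovil/musescore-choir-plugins | rename_parts.py | part_names_for_run
-- ===== SOURCE A (Python) =====
-- from typing import List, Tuple
--
-- PART_FULL_NAMES = {
--     "S": "Soprano",
--     "A": "Alto",
--     "T": "Tenor",
--     "B": "Bass",
--     "M": "Men",
--     "W": "Women",
-- }
--
-- PART_SHORT_PREFIX = {
--     "S": "S",
--     "A": "A",
--     "T": "T",
--     "B": "B",
--     "M": "M",
--     "W": "W",
-- }
--
-- def part_names_for_run(letter: str, run_length: int) -> List[Tuple[str, str]]:
--     """
--     For a run of the same letter, return [(short_name, full_name), ...].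
--     - 1 part: S1 / Soprano 1
--     - 2 parts: S1, S2 / Soprano 1, Soprano 2
--     - 3+ parts: pairs with -1, -2 (S1-1, S1-2, S2-1, S2-2, ...); last can be single (S2).
--     """
--     prefix = PART_SHORT_PREFIX[letter]
--     full_base = PART_FULL_NAMES[letter]
--     result: List[Tuple[str, str]] = []
--     use_pairs = run_length >= 3
--     for k in range(run_length):
--         if use_pairs:
--             group = k // 2 + 1
--             if k % 2 == 1:
--                 short_name = f"{prefix}{group}-2"
--                 full_name = f"{full_base} {group}-2"
--             elif k + 1 < run_length:
--                 short_name = f"{prefix}{group}-1"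
--                 full_name = f"{full_base} {group}-1"
--             else:
--                 short_name = f"{prefix}{group}"
--                 full_name = f"{full_base} {group}"
--         else:
--             num = k + 1
--             short_name = f"{prefix}{num}"
--             full_name = f"{full_base} {num}"
--         result.append((short_name, full_name))
--     return result
-- ===== SOURCE B (Python) =====
-- from typing import List, Tuple
--
-- PART_FULL_NAMES = {
--     "S": "Soprano",
--     "A": "Alto",
--     "T": "Tenor",
--     "B": "Bass",
--     "M": "Men",
--     "W": "Women",
-- }
--
-- PART_SHORT_PREFIX = {
--     "S": "S",
--     "A": "A",
--     "T": "T",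
--     "B": "B",
--     "M": "M",
--     "W": "W",
-- }
--
-- def part_names_for_run(letter: str, run_length: int) -> List[Tuple[str, str]]:
--     prefix = PART_SHORT_PREFIX[letter]
--     base = PART_FULL_NAMES[letter]
--     if run_length < 3:
--         return [(f"{prefix}{i}", f"{base} {i}") for i in range(1, run_length + 1)]
--     result: List[Tuple[str, str]] = []
--     for g in range(1, run_length // 2 + 1):
--         result.append((f"{prefix}{g}-1", f"{base} {g}-1"))
--         result.append((f"{prefix}{g}-2", f"{base} {g}-2"))
--     if run_length % 2 == 1:
--         g = run_length // 2 + 1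
--         result.append((f"{prefix}{g}", f"{base} {g}"))
--     return result
-- ===== Notes on version B (the rewrite author's own statement) =====
-- stated objective: simpler
-- what changed: B iterates over groups (two labels per group, plus an optional odd remainder) instead of per-element indices with k//2 and parity/last-element checks, and handles the short-run case with a direct comprehension.
import Mathlib
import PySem

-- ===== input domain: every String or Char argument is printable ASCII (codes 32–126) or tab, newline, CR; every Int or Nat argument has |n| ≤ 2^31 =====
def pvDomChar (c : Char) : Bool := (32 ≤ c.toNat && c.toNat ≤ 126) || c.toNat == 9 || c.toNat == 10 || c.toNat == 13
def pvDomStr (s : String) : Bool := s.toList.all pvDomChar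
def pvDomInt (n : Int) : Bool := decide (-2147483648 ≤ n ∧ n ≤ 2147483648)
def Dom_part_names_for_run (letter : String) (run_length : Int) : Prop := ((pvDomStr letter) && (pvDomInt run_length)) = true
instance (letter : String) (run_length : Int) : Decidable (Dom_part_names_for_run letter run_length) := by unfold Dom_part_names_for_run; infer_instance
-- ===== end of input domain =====

-- One honest line: B builds the list group-by-group (pair per group + odd remainder) instead of per-element with parity checks; same cost, plainer shape.

-- module constants (shared by both Pythons)
def PART_FULL_NAMES : PySem.Dict String String :=
  PySem.Dict.ofList [("S", "Soprano"), ("A", "Alto"), ("T", "Tenor"), ("B", "Bass"), ("M", "Men"), ("W", "Women")]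
def PART_SHORT_PREFIX : PySem.Dict String String :=
  PySem.Dict.ofList [("S", "S"), ("A", "A"), ("T", "T"), ("B", "B"), ("M", "M"), ("W", "W")]

-- ===== PORT A =====
def part_names_for_run (letter : String) (run_length : Int) : List (String × String) :=
  let pfx := (PySem.Dict.get? PART_SHORT_PREFIX letter).getD ""   -- Pre_ guarantees the key is present (Python: KeyError otherwise)
  let full_base := (PySem.Dict.get? PART_FULL_NAMES letter).getD ""
  let use_pairs : Bool := run_length ≥ 3
  (PySem.List.pyRange 0 run_length 1).foldl
    (fun result k =>
      let entry :=
        if use_pairs then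
          let group := PySem.Int.floordiv k 2 + 1
          if PySem.Int.mod k 2 = 1 then
            (pfx ++ PySem.Int.toStr group ++ "-2", full_base ++ " " ++ PySem.Int.toStr group ++ "-2")
          else if k + 1 < run_length then
            (pfx ++ PySem.Int.toStr group ++ "-1", full_base ++ " " ++ PySem.Int.toStr group ++ "-1")
          else
            (pfx ++ PySem.Int.toStr group, full_base ++ " " ++ PySem.Int.toStr group)
        else
          let num := k + 1
          (pfx ++ PySem.Int.toStr num, full_base ++ " " ++ PySem.Int.toStr num)
      result ++ [entry]) []

-- ===== PORT B =====
def part_names_for_run_alt (letter : String) (run_length : Int) : List (String × String) :=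
  let pfx := (PySem.Dict.get? PART_SHORT_PREFIX letter).getD ""
  let base := (PySem.Dict.get? PART_FULL_NAMES letter).getD ""
  if run_length < 3 then
    (PySem.List.pyRange 1 (run_length + 1) 1).map
      (fun i => (pfx ++ PySem.Int.toStr i, base ++ " " ++ PySem.Int.toStr i))
  else
    let result := (PySem.List.pyRange 1 (PySem.Int.floordiv run_length 2 + 1) 1).foldl
      (fun result g =>
        result ++ [(pfx ++ PySem.Int.toStr g ++ "-1", base ++ " " ++ PySem.Int.toStr g ++ "-1"),
                   (pfx ++ PySem.Int.toStr g ++ "-2", base ++ " " ++ PySem.Int.toStr g ++ "-2")]) []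
    if PySem.Int.mod run_length 2 = 1 then
      let g := PySem.Int.floordiv run_length 2 + 1
      result ++ [(pfx ++ PySem.Int.toStr g, base ++ " " ++ PySem.Int.toStr g)]
    else
      result

-- ===== PRECONDITION & SPEC =====
-- Pre_ excludes only letters that are not keys of the two dicts: Python A raises KeyError there (B does too).
def Pre_part_names_for_run (letter : String) (run_length : Int) : Prop :=
  letter = "S" ∨ letter = "A" ∨ letter = "T" ∨ letter = "B" ∨ letter = "M" ∨ letter = "W"
instance (letter : String) (run_length : Int) : Decidable (Pre_part_names_for_run letter run_length) := by
  unfold Pre_part_names_for_run; infer_instance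
def pvWitness_part_names_for_run : String × Int := ("S", 5)

def Spec_part_names_for_run (letter : String) (run_length : Int) (out : List (String × String)) : Prop := out = part_names_for_run_alt letter run_length
instance (letter : String) (run_length : Int) (out : List (String × String)) : Decidable (Spec_part_names_for_run letter run_length out) := by unfold Spec_part_names_for_run; infer_instance

-- ===== CLAIM (what is proved, stated in full; the proofs are below) =====
def Claim_equal_part_names_for_run : Prop := ∀ (letter : String) (run_length : Int), Dom_part_names_for_run letter run_length → Pre_part_names_for_run letter run_length → Spec_part_names_for_run letter run_length (part_names_for_run letter run_length)

-- ===== LEMMAS AND PROOFS =====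

-- B's pair-per-group flatMap, read as a per-element map with parity dispatch.
theorem flatMap_pair_eq_map_range {α : Type} (u v : Nat → α) (q : Nat) :
    (List.range q).flatMap (fun j => [u j, v j]) =
      (List.range (2 * q)).map (fun i => if i % 2 = 0 then u (i / 2) else v (i / 2)) := by
  induction q with
  | zero => simp
  | succ q ih =>
    have h2 : 2 * (q + 1) = (2 * q + 1) + 1 := by ring
    rw [List.range_succ, h2, List.range_succ, List.range_succ]
    simp only [List.flatMap_append, List.map_append, ih, List.flatMap_cons, List.flatMap_nil,
      List.map_cons, List.map_nil, List.append_assoc]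
    have e1 : (2 * q) % 2 = 0 := by omega
    have e2 : (2 * q + 1) % 2 ≠ 0 := by omega
    have e3 : (2 * q) / 2 = q := by omega
    have e4 : (2 * q + 1) / 2 = q := by omega
    simp [e1, e3, e4]

theorem part_names_for_run_spec : Claim_equal_part_names_for_run := by
  intro letter run_length _ _
  unfold Spec_part_names_for_run part_names_for_run part_names_for_run_alt
  simp only []
  set pfx := (PySem.Dict.get? PART_SHORT_PREFIX letter).getD "" with hp
  set base := (PySem.Dict.get? PART_FULL_NAMES letter).getD "" with hb
  by_cases hlt : run_length < 3
  · -- short-run case: both are a plain map over the same count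
    have hge : ¬ run_length ≥ 3 := by omega
    simp only [hge, if_pos hlt, decide_false, Bool.false_eq_true, if_false,
      PySem.List.foldl_append_singleton_eq_map, List.nil_append]
    rw [PySem.List.pyRange_one 0 run_length, PySem.List.pyRange_one 1 (run_length + 1)]
    have : run_length + 1 - 1 = run_length - 0 := by ring
    rw [this]
    simp only [List.map_map]
    refine List.map_congr_left (fun k _ => ?_)
    simp only [Function.comp_apply]
    have : (0 : Int) + (k : Int) + 1 = 1 + (k : Int) := by ring
    rw [this]
  · -- pairs case
    have hge : run_length ≥ 3 := by omega
    obtain ⟨m, hm⟩ : ∃ m : Nat, run_length = (m : Int) := ⟨run_length.toNat, by omega⟩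
    subst hm
    have hm3 : 3 ≤ m := by exact_mod_cast hge
    rw [if_neg hlt]
    have hdec : decide ((3:Int) ≤ (m:Int)) = true := decide_eq_true hge
    simp only [hdec, if_true, PySem.List.foldl_append_singleton_eq_map, List.nil_append,
      PySem.List.foldl_append_eq_flatMap]
    have hfd : PySem.Int.floordiv (m : Int) 2 = ((m / 2 : Nat) : Int) := by
      exact_mod_cast PySem.Int.floordiv_natCast m 2
    have hmd : PySem.Int.mod (m : Int) 2 = ((m % 2 : Nat) : Int) := by
      exact_mod_cast PySem.Int.mod_natCast m 2
    -- rewrite both ranges into List.range over Nat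
    rw [PySem.List.pyRange_one 0 (m : Int), PySem.List.pyRange_one 1 (PySem.Int.floordiv (m : Int) 2 + 1)]
    have h1 : ((m : Int) - 0).toNat = m := by omega
    have h2 : (PySem.Int.floordiv (m : Int) 2 + 1 - 1).toNat = m / 2 := by rw [hfd]; omega
    rw [h1, h2]
    simp only [List.flatMap_map]
    rw [flatMap_pair_eq_map_range
      (fun j => (pfx ++ PySem.Int.toStr (1 + (j:Int)) ++ "-1", base ++ " " ++ PySem.Int.toStr (1 + (j:Int)) ++ "-1"))
      (fun j => (pfx ++ PySem.Int.toStr (1 + (j:Int)) ++ "-2", base ++ " " ++ PySem.Int.toStr (1 + (j:Int)) ++ "-2"))]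
    -- split A's range: m = 2*(m/2) + m%2
    have hsplit : m = 2 * (m / 2) + m % 2 := by omega
    by_cases hodd : m % 2 = 1
    · -- odd: A's last element is the bare label of group m/2 + 1
      have hmeq : m = (2 * (m / 2)) + 1 := by omega
      rw [hmd]
      have h12 : ((m % 2 : Nat) : Int) = 1 := by rw [hodd]; simp
      rw [h12, if_pos rfl]
      conv_lhs => rw [hmeq, List.range_succ]
      simp only [List.map_append, List.map_map]
      congr 1
      · refine List.map_congr_left (fun k hk => ?_)
        have hk2 : k < 2 * (m / 2) := List.mem_range.mp hk
        simp only [Function.comp_apply]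
        have hz : (0 : Int) + (k : Int) = (k : Int) := by ring
        rw [hz]
        have hfk : PySem.Int.floordiv (k : Int) 2 = ((k / 2 : Nat) : Int) := by
          exact_mod_cast PySem.Int.floordiv_natCast k 2
        have hmk : PySem.Int.mod (k : Int) 2 = ((k % 2 : Nat) : Int) := by
          exact_mod_cast PySem.Int.mod_natCast k 2
        by_cases hkodd : k % 2 = 0
        · have hne : PySem.Int.mod (k : Int) 2 ≠ 1 := by rw [hmk, hkodd]; simp
          have hlt' : (k : Int) + 1 < ((2 * (m / 2) + 1 : Nat) : Int) := by
            have : k + 1 < 2 * (m / 2) + 1 := by omega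
            exact_mod_cast this
          rw [if_neg hne, if_pos hlt', if_pos hkodd, hfk]
          have : ((k / 2 : Nat) : Int) + 1 = 1 + ((k / 2 : Nat) : Int) := by ring
          rw [this]
        · have hk1 : k % 2 = 1 := by omega
          have heq : PySem.Int.mod (k : Int) 2 = 1 := by rw [hmk, hk1]; simp
          rw [if_pos heq, if_neg hkodd, hfk]
          have : ((k / 2 : Nat) : Int) + 1 = 1 + ((k / 2 : Nat) : Int) := by ring
          rw [this]
      · -- the trailing element
        simp only [List.map_cons, List.map_nil, Function.comp_apply]
        have hz : (0 : Int) + ((2 * (m / 2) : Nat) : Int) = ((2 * (m / 2) : Nat) : Int) := by ring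
        rw [hz]
        have hmk : PySem.Int.mod ((2 * (m / 2) : Nat) : Int) 2 = (((2 * (m / 2)) % 2 : Nat) : Int) := by
          exact_mod_cast PySem.Int.mod_natCast (2 * (m / 2)) 2
        have hne : PySem.Int.mod ((2 * (m / 2) : Nat) : Int) 2 ≠ 1 := by
          rw [hmk]; have h0 : (2 * (m / 2)) % 2 = 0 := by omega
          rw [h0]; simp
        have hnl : ¬ (((2 * (m / 2) : Nat) : Int) + 1 < ((2 * (m / 2) + 1 : Nat) : Int)) := by
          intro hc
          have : 2 * (m / 2) + 1 < 2 * (m / 2) + 1 := by exact_mod_cast hc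
          omega
        rw [if_neg hne, if_neg hnl]
        have hfk : PySem.Int.floordiv ((2 * (m / 2) : Nat) : Int) 2 = (((2 * (m / 2)) / 2 : Nat) : Int) := by
          exact_mod_cast PySem.Int.floordiv_natCast (2 * (m / 2)) 2
        have hq : (2 * (m / 2)) / 2 = m / 2 := by omega
        rw [hfk, hq, hfd]
    · -- even: no trailing element
      have hm0 : m % 2 = 0 := by omega
      rw [hmd]
      have hne : ((m % 2 : Nat) : Int) ≠ 1 := by rw [hm0]; simp
      rw [if_neg hne]
      have hmeq : m = 2 * (m / 2) := by omega
      conv_lhs => rw [hmeq]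
      simp only [List.map_map]
      refine List.map_congr_left (fun k hk => ?_)
      have hk2 : k < 2 * (m / 2) := List.mem_range.mp hk
      simp only [Function.comp_apply]
      have hz : (0 : Int) + (k : Int) = (k : Int) := by ring
      rw [hz]
      have hfk : PySem.Int.floordiv (k : Int) 2 = ((k / 2 : Nat) : Int) := by
        exact_mod_cast PySem.Int.floordiv_natCast k 2
      have hmk : PySem.Int.mod (k : Int) 2 = ((k % 2 : Nat) : Int) := by
        exact_mod_cast PySem.Int.mod_natCast k 2
      by_cases hkodd : k % 2 = 0
      · have hne' : PySem.Int.mod (k : Int) 2 ≠ 1 := by rw [hmk, hkodd]; simp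
        have hlt' : (k : Int) + 1 < ((2 * (m / 2) : Nat) : Int) := by
          have : k + 1 < 2 * (m / 2) := by omega
          exact_mod_cast this
        rw [if_neg hne', if_pos hlt', if_pos hkodd, hfk]
        have : ((k / 2 : Nat) : Int) + 1 = 1 + ((k / 2 : Nat) : Int) := by ring
        rw [this]
      · have hk1 : k % 2 = 1 := by omega
        have heq : PySem.Int.mod (k : Int) 2 = 1 := by rw [hmk, hk1]; simp
        rw [if_pos heq, if_neg hkodd, hfk]
        have : ((k / 2 : Nat) : Int) + 1 = 1 + ((k / 2 : Nat) : Int) := by ring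
        rw [this]
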